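-- pv_equiv track=rewrite | github.com/dreadwrr/Recentchanges-Linux | usr/local/recentchanges/src/qtfunctions.py | sort_right
-- ===== SOURCE A (Python) =====
-- def sort_right(tables, cache_table, systimeche, suffix):
--     a, b, c, tbl = [], [], [], []
--     # systime = self.systimeche.split("_", 1)[-1]  # sys_delim = systime + "_"
--     is_basedir = suffix == "/"
--     if is_basedir:
--         for t in tables:
--             if "sys" in t and "_" in t:
--                 b.append(t)
--             elif "cache" in t and t != cache_table:
--                 b.append(t)
--             else:
--                 a.append(t)
--         tbl = a + b
--     else:
--         for t in tables:
--             if t.startswith("sys"):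
--                 if suffix in t:
--                     if t == systimeche:
--                         c.append(t)  # major long string goes to c
--                     else:
--                         a.append(t)  # major
--                 else:
--                     b.append(t)
--             elif t.startswith("cache"):
--                 if t == cache_table:
--                     c.append(t)  # minor goes to c
--                 else:
--                     b.append(t)
--             else:
--                 tbl.append(t)  # reg sql table
--         tbl = tbl + a + c + b
--     return tbl
-- ===== SOURCE B (Python) =====
-- def sort_right(tables, cache_table, systimeche, suffix):
--     if suffix == "/":
--         def key(t):
--             return 1 if ("sys" in t and "_" in t) or ("cache" in t and t != cache_table) else 0
--     else:
--         def key(t):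
--             if t.startswith("sys"):
--                 return (2 if t == systimeche else 1) if suffix in t else 3
--             if t.startswith("cache"):
--                 return 2 if t == cache_table else 3
--             return 0
--     return sorted(tables, key=key)
-- ===== Notes on version B (the rewrite author's own statement) =====
-- stated objective: simpler
-- what changed: Replaces the explicit four-bucket accumulation loop and concatenation with a single stable sorted() call over an integer category key mirroring A's branch precedence.
import Mathlib
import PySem

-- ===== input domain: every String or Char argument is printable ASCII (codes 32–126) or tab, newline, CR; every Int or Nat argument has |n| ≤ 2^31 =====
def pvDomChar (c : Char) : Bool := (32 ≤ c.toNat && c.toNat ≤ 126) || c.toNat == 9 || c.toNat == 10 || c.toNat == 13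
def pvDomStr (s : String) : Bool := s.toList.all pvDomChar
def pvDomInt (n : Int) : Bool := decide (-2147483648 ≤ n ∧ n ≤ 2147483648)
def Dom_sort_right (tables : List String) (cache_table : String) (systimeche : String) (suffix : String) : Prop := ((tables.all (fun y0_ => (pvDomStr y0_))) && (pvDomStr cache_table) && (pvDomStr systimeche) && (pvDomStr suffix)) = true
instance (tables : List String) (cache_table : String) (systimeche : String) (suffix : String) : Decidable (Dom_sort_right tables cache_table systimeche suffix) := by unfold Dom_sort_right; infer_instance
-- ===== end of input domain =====

-- B replaces A's explicit bucket-accumulation loops and concatenation by one stable sort on an integer category key (objective: simpler).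

-- ===== PORT A =====
-- A's basedir loop body, state (a, b).
def srStepBase (cache_table : String) (s : List String × List String) (t : String) :
    List String × List String :=
  if PySem.Str.isIn "sys" t && PySem.Str.isIn "_" t then (s.1, s.2 ++ [t])
  else if PySem.Str.isIn "cache" t && t ≠ cache_table then (s.1, s.2 ++ [t])
  else (s.1 ++ [t], s.2)

-- A's non-basedir loop body, state (a, b, c, tbl).
def srStepOther (cache_table systimeche suffix : String)
    (s : List String × List String × List String × List String) (t : String) :
    List String × List String × List String × List String :=
  if PySem.Str.startswith t "sys" then
    if PySem.Str.isIn suffix t then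
      if t = systimeche then (s.1, s.2.1, s.2.2.1 ++ [t], s.2.2.2)
      else (s.1 ++ [t], s.2.1, s.2.2.1, s.2.2.2)
    else (s.1, s.2.1 ++ [t], s.2.2.1, s.2.2.2)
  else if PySem.Str.startswith t "cache" then
    if t = cache_table then (s.1, s.2.1, s.2.2.1 ++ [t], s.2.2.2)
    else (s.1, s.2.1 ++ [t], s.2.2.1, s.2.2.2)
  else (s.1, s.2.1, s.2.2.1, s.2.2.2 ++ [t])

def sort_right (tables : List String) (cache_table : String) (systimeche : String) (suffix : String) : List String :=
  let is_basedir := suffix = "/"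
  if is_basedir then
    let s := tables.foldl (srStepBase cache_table) ([], [])
    s.1 ++ s.2                                     -- tbl = a + b
  else
    let s := tables.foldl (srStepOther cache_table systimeche suffix) ([], [], [], [])
    s.2.2.2 ++ s.1 ++ s.2.2.1 ++ s.2.1             -- tbl = tbl + a + c + b

-- ===== PORT B =====
def srKeyBase (cache_table : String) (t : String) : Int :=
  if (PySem.Str.isIn "sys" t && PySem.Str.isIn "_" t) || (PySem.Str.isIn "cache" t && t ≠ cache_table) then 1 else 0

def srKeyOther (cache_table systimeche suffix : String) (t : String) : Int :=
  if PySem.Str.startswith t "sys" then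
    if PySem.Str.isIn suffix t then (if t = systimeche then 2 else 1) else 3
  else if PySem.Str.startswith t "cache" then (if t = cache_table then 2 else 3)
  else 0

def sort_right_alt (tables : List String) (cache_table : String) (systimeche : String) (suffix : String) : List String :=
  if suffix = "/" then PySem.List.sorted tables (srKeyBase cache_table) false
  else PySem.List.sorted tables (srKeyOther cache_table systimeche suffix) false

-- ===== PRECONDITION & SPEC =====
def Spec_sort_right (tables : List String) (cache_table : String) (systimeche : String) (suffix : String) (out : List String) : Prop := out = sort_right_alt tables cache_table systimeche suffix
instance (tables : List String) (cache_table : String) (systimeche : String) (suffix : String) (out : List String) : Decidable (Spec_sort_right tables cache_table systimeche suffix out) := by unfold Spec_sort_right; infer_instance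

-- ===== CLAIM (what is proved, stated in full; the proofs are below) =====
def Claim_equal_sort_right : Prop := ∀ (tables : List String) (cache_table : String) (systimeche : String) (suffix : String), Dom_sort_right tables cache_table systimeche suffix → Spec_sort_right tables cache_table systimeche suffix (sort_right tables cache_table systimeche suffix)

-- ===== LEMMAS AND PROOFS =====

-- insertBy drops x between a prefix it is not 'before' and a suffix it is 'before'.
theorem srInsertBy_split {α : Type} (before : α → α → Bool) (x : α) (P S : List α)
    (hP : ∀ y ∈ P, before x y = false) (hS : ∀ y ∈ S, before x y = true) :
    PySem.List.insertBy before x (P ++ S) = P ++ x :: S := by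
  induction P with
  | nil =>
    cases S with
    | nil => simp [PySem.List.insertBy]
    | cons s S' => simp [PySem.List.insertBy, hS s (by simp)]
  | cons p P' ih =>
    have hp := hP p (by simp)
    simp only [List.cons_append, PySem.List.insertBy, hp]
    simp only [Bool.false_eq_true, if_false, List.cons.injEq, true_and]
    exact ih (fun y hy => hP y (by simp [hy]))

-- A stable sort by a key with values in {0,1,2,3} is the concatenation of the four key buckets.
theorem srSorted_buckets {α : Type} (key : α → Int) (hk : ∀ x : α, 0 ≤ key x ∧ key x ≤ 3)
    (xs : List α) :
    PySem.List.sorted xs key false =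
      xs.filter (fun t => key t == 0) ++ xs.filter (fun t => key t == 1) ++
      xs.filter (fun t => key t == 2) ++ xs.filter (fun t => key t == 3) := by
  induction xs using List.reverseRecOn with
  | nil => simp [PySem.List.sorted]
  | append_singleton xs x ih =>
    have hfold : PySem.List.sorted (xs ++ [x]) key false
        = PySem.List.insertBy (fun a b => decide (key a < key b)) x (PySem.List.sorted xs key false) := by
      simp [PySem.List.sorted, List.foldl_append]
    have hmem : ∀ (i : Int) (y : α), y ∈ xs.filter (fun t => key t == i) → key y = i := by
      intro i y hy
      have := List.of_mem_filter hy
      simpa using this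
    rw [hfold, ih]
    rcases hk x with ⟨h0, h3⟩
    interval_cases h : key x
    · -- key x = 0 : goes after bucket 0
      have := srInsertBy_split (fun a b => decide (key a < key b)) x
        (xs.filter (fun t => key t == 0))
        (xs.filter (fun t => key t == 1) ++ xs.filter (fun t => key t == 2) ++ xs.filter (fun t => key t == 3))
        (by intro y hy; have := hmem 0 y hy; simp [h, this])
        (by intro y hy
            simp only [List.mem_append] at hy
            rcases hy with (hy | hy) | hy
            · have := hmem 1 y hy; simp [h, this]
            · have := hmem 2 y hy; simp [h, this]
            · have := hmem 3 y hy; simp [h, this])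
      simp only [List.append_assoc] at this ⊢
      rw [this]
      simp [List.filter_append, h]
    · have := srInsertBy_split (fun a b => decide (key a < key b)) x
        (xs.filter (fun t => key t == 0) ++ xs.filter (fun t => key t == 1))
        (xs.filter (fun t => key t == 2) ++ xs.filter (fun t => key t == 3))
        (by intro y hy
            simp only [List.mem_append] at hy
            rcases hy with hy | hy
            · have := hmem 0 y hy; simp [h, this]
            · have := hmem 1 y hy; simp [h, this])
        (by intro y hy
            simp only [List.mem_append] at hy
            rcases hy with hy | hy
            · have := hmem 2 y hy; simp [h, this]
            · have := hmem 3 y hy; simp [h, this])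
      simp only [List.append_assoc] at this ⊢
      rw [this]
      simp [List.filter_append, h]
    · have := srInsertBy_split (fun a b => decide (key a < key b)) x
        (xs.filter (fun t => key t == 0) ++ xs.filter (fun t => key t == 1) ++ xs.filter (fun t => key t == 2))
        (xs.filter (fun t => key t == 3))
        (by intro y hy
            simp only [List.mem_append] at hy
            rcases hy with (hy | hy) | hy
            · have := hmem 0 y hy; simp [h, this]
            · have := hmem 1 y hy; simp [h, this]
            · have := hmem 2 y hy; simp [h, this])
        (by intro y hy; have := hmem 3 y hy; simp [h, this])
      simp only [List.append_assoc] at this ⊢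
      rw [this]
      simp [List.filter_append, h]
    · have := srInsertBy_split (fun a b => decide (key a < key b)) x
        (xs.filter (fun t => key t == 0) ++ xs.filter (fun t => key t == 1) ++ xs.filter (fun t => key t == 2) ++ xs.filter (fun t => key t == 3))
        []
        (by intro y hy
            simp only [List.mem_append] at hy
            rcases hy with ((hy | hy) | hy) | hy
            · have := hmem 0 y hy; simp [h, this]
            · have := hmem 1 y hy; simp [h, this]
            · have := hmem 2 y hy; simp [h, this]
            · have := hmem 3 y hy; simp [h, this])
        (by intro y hy; simp at hy)
      simp only [List.append_assoc, List.append_nil] at this ⊢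
      rw [this]
      simp [List.filter_append, h]

theorem srKeyBase_bounds (ct t : String) : 0 ≤ srKeyBase ct t ∧ srKeyBase ct t ≤ 3 := by
  unfold srKeyBase; split <;> simp

theorem srKeyOther_bounds (ct st sf t : String) : 0 ≤ srKeyOther ct st sf t ∧ srKeyOther ct st sf t ≤ 3 := by
  unfold srKeyOther; split_ifs <;> simp

-- A's step functions, re-expressed through B's keys (branch-by-branch case check).
theorem srStepBase_key (ct : String) (s : List String × List String) (t : String) :
    srStepBase ct s t = if srKeyBase ct t = 1 then (s.1, s.2 ++ [t]) else (s.1 ++ [t], s.2) := by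
  unfold srStepBase srKeyBase
  by_cases h1 : (PySem.Str.isIn "sys" t && PySem.Str.isIn "_" t) = true
  · simp at h1
    simp [h1]
  · by_cases h2 : (PySem.Str.isIn "cache" t && decide (t ≠ ct)) = true
    · simp at h1 h2
      simp [h2]
    · simp at h1 h2
      rw [if_neg (by simpa using h1), if_neg (by simpa using h2), if_neg (by simp; exact ⟨h1, h2⟩)]

theorem srKeyBase_cases (ct t : String) : srKeyBase ct t = 0 ∨ srKeyBase ct t = 1 := by
  unfold srKeyBase; split <;> simp

theorem srStepOther_key (ct st sf : String)
    (s : List String × List String × List String × List String) (t : String) :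
    srStepOther ct st sf s t =
      if srKeyOther ct st sf t = 1 then (s.1 ++ [t], s.2.1, s.2.2.1, s.2.2.2)
      else if srKeyOther ct st sf t = 2 then (s.1, s.2.1, s.2.2.1 ++ [t], s.2.2.2)
      else if srKeyOther ct st sf t = 3 then (s.1, s.2.1 ++ [t], s.2.2.1, s.2.2.2)
      else (s.1, s.2.1, s.2.2.1, s.2.2.2 ++ [t]) := by
  unfold srStepOther srKeyOther; split_ifs <;> simp_all

theorem srKeyOther_cases (ct st sf t : String) :
    srKeyOther ct st sf t = 0 ∨ srKeyOther ct st sf t = 1 ∨ srKeyOther ct st sf t = 2 ∨ srKeyOther ct st sf t = 3 := by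
  unfold srKeyOther; split_ifs <;> simp

-- A's basedir fold appends the two key buckets to its accumulators.
theorem srFoldBase (ct : String) (ts : List String) :
    ∀ (a b : List String), ts.foldl (srStepBase ct) (a, b)
      = (a ++ ts.filter (fun t => srKeyBase ct t == 0), b ++ ts.filter (fun t => srKeyBase ct t == 1)) := by
  induction ts with
  | nil => intro a b; simp
  | cons t ts ih =>
    intro a b
    rw [List.foldl_cons, srStepBase_key]
    rcases srKeyBase_cases ct t with hk | hk <;>
      simp only [hk, if_true, if_false, reduceIte] <;> rw [ih] <;> simp [List.filter_cons, hk]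

-- A's non-basedir fold appends the four key buckets to its accumulators.
theorem srFoldOther (ct st sf : String) (ts : List String) :
    ∀ (a b c tbl : List String), ts.foldl (srStepOther ct st sf) (a, b, c, tbl)
      = (a ++ ts.filter (fun t => srKeyOther ct st sf t == 1),
         b ++ ts.filter (fun t => srKeyOther ct st sf t == 3),
         c ++ ts.filter (fun t => srKeyOther ct st sf t == 2),
         tbl ++ ts.filter (fun t => srKeyOther ct st sf t == 0)) := by
  induction ts with
  | nil => intro a b c tbl; simp
  | cons t ts ih =>
    intro a b c tbl
    rw [List.foldl_cons, srStepOther_key]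
    rcases srKeyOther_cases ct st sf t with hk | hk | hk | hk <;>
      simp only [hk, reduceIte] <;> rw [ih] <;> simp [List.filter_cons, hk]

-- ===== VERDICT (by name: the statement is the Claim_ definition above) =====
theorem sort_right_spec : Claim_equal_sort_right := by
  intro tables ct st sf _
  unfold Spec_sort_right sort_right sort_right_alt
  by_cases hb : sf = "/"
  · simp only [hb, if_true]
    rw [srFoldBase ct tables [] []]
    rw [srSorted_buckets (srKeyBase ct) (srKeyBase_bounds ct) tables]
    have h2 : tables.filter (fun t => srKeyBase ct t == 2) = [] := by
      apply List.filter_eq_nil_iff.mpr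
      intro t _
      rcases srKeyBase_bounds ct t with ⟨_, _⟩
      unfold srKeyBase; split <;> simp
    have h3 : tables.filter (fun t => srKeyBase ct t == 3) = [] := by
      apply List.filter_eq_nil_iff.mpr
      intro t _
      unfold srKeyBase; split <;> simp
    simp [h2, h3]
  · simp only [hb, if_false]
    rw [srFoldOther ct st sf tables [] [] [] []]
    rw [srSorted_buckets (srKeyOther ct st sf) (srKeyOther_bounds ct st sf) tables]
    simp
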